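-- pv_equiv track=rewrite | github.com/njh197/njh197-Chat-Program | rsa.py | generate_e
-- ===== SOURCE A (Python) =====
-- def isprime(num): #判断质数
--     for i in range(2,num):
--         if num%i==0:
--             return False
--     return True
--
-- def generate_e(p,q,bigger=True):
--     t=(p-1)*(q-1)
--     if bigger:
--         for i in range(t,0,-1):
--             if isprime(i) and t%i!=0:
--                 return i
--     else:
--         for i in range(1,t+1):
--             if isprime(i) and t%i!=0:
--                 return i
--         return -1
-- ===== SOURCE B (Python) =====
-- def _isprime(n):
--     # trial division by 2 and by odd d while d*d <= n
--     if n % 2 == 0: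
--         return n == 2
--     for d in range(3, n, 2):
--         if d * d > n:
--             return True
--         if n % d == 0:
--             return False
--     return True
--
-- def generate_e(p, q, bigger=True):
--     t = (p - 1) * (q - 1)
--     if bigger:
--         # sieve[i] truthy iff A's isprime(i) (i.e. i < 2 or i prime): Sieve of Eratosthenes
--         sieve = bytearray(b"\x01") * (t + 1)
--         i = 2
--         while i * i <= t:
--             if sieve[i]:
--                 sieve[i * i : t + 1 : i] = b"\x00" * len(range(i * i, t + 1, i))
--             i += 1
--         return next((i for i in range(t, 0, -1) if sieve[i] and t % i), None)
--     # ascending: the answer is the smallest non-dividing prime, which is tiny; no table needed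
--     for i in range(2, t + 1):
--         if t % i and _isprime(i):
--             return i
--     return -1
-- ===== Notes on version B (the rewrite author's own statement) =====
-- stated objective: alternative
-- what changed: For the descending search B precomputes one Sieve-of-Eratosthenes table over [0, t] and scans the range with a table lookup, and for the ascending search it scans with a sqrt-bounded trial-division test, instead of A's full trial-division primality test (every integer in [2, i)) inside both scans.
import Mathlib
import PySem

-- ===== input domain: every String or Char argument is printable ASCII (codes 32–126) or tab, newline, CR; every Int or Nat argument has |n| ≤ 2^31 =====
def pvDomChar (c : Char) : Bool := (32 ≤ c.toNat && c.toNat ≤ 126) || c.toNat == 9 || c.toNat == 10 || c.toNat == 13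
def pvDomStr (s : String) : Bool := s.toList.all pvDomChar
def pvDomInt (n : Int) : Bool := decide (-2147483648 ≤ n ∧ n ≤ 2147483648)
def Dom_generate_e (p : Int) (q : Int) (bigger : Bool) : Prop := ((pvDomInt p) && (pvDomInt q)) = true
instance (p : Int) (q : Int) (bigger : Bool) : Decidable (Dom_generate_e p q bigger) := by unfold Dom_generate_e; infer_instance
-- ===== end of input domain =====

-- B replaces A's per-candidate full trial division: the descending branch consults one Sieve-of-Eratosthenes table over [0, t] via a range scan, the ascending branch scans with a sqrt-bounded trial-division test (objective: alternative).


-- ===== PORT A =====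
-- for i in range(2, num): if num % i == 0: return False / return True
-- (the Nat argument is fuel = the remaining length of the lazily iterated range; the Python tests stay in the body)
def isprimeLoop (num : Int) (i : Int) : Nat → Bool
  | 0 => true
  | k + 1 =>
    if i < num then
      if PySem.Int.mod num i == 0 then false else isprimeLoop num (i + 1) k
    else true

def isprime (num : Int) : Bool := isprimeLoop num 2 (num - 2).toNat

-- for i in range(t, 0, -1): if isprime(i) and t % i != 0: return i
def geLoopA_down (t : Int) (i : Int) : Nat → Option Int
  | 0 => none
  | k + 1 =>
    if 0 < i then
      if isprime i && !(PySem.Int.mod t i == 0) then some i else geLoopA_down t (i - 1) k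
    else none

-- for i in range(1, t+1): if isprime(i) and t % i != 0: return i
def geLoopA_up (t : Int) (i : Int) : Nat → Option Int
  | 0 => none
  | k + 1 =>
    if i < t + 1 then
      if isprime i && !(PySem.Int.mod t i == 0) then some i else geLoopA_up t (i + 1) k
    else none

def generate_e (p : Int) (q : Int) (bigger : Bool) : Option Int :=
  let t := (p - 1) * (q - 1)
  if bigger then
    geLoopA_down t t t.toNat
  else
    match geLoopA_up t 1 (t + 1 - 1).toNat with
    | some i => some i
    | none => some (-1)

-- ===== PORT B =====
-- if n % 2 == 0: return n == 2 / for d in range(3, n, 2): if d*d > n: return True / if n % d == 0: return False / return True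
-- (fuel bounds the lazy odd-step range; the loop exits through d*d > n or d < n long before it runs out)
def isprimeAltLoop (n : Int) (d : Int) : Nat → Bool
  | 0 => true
  | k + 1 =>
    if d < n then
      if d * d > n then true
      else if PySem.Int.mod n d == 0 then false
      else isprimeAltLoop n (d + 2) k
    else true

def isprimeAlt (n : Int) : Bool :=
  if PySem.Int.mod n 2 == 0 then n == 2
  else isprimeAltLoop n 3 (n - 3).toNat

-- sieve = bytearray(b"\x01") * (t + 1); while i*i <= t: if sieve[i]: sieve[i*i : t+1 : i] = zeros
-- (the bytearray is ported as Array Bool, its 1/0 entries as true/false — only their truthiness is ever read;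
--  the slice assignment zeroes exactly the indices range(i*i, t+1, i), all inside [0, len), ported as the
--  fold of setIfInBounds j.toNat over that range; the Nat argument of sieveLoop is fuel for the while loop:
--  it stops via the i*i ≤ t test long before t.toNat runs out)
def markMultiples (t : Int) (s : Array Bool) (i : Int) : Array Bool :=
  (PySem.List.pyRange (i * i) (t + 1) i).foldl (fun s j => s.setIfInBounds j.toNat false) s

def sieveLoop (t : Int) (s : Array Bool) (i : Int) : Nat → Array Bool
  | 0 => s
  | k + 1 =>
    if i * i ≤ t then
      sieveLoop t (if s.getD i.toNat false then markMultiples t s i else s) (i + 1) k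
    else s

def buildSieve (t : Int) : Array Bool :=
  sieveLoop t (Array.replicate (t + 1).toNat true) 2 t.toNat

-- B's ascending scan, starting at 2: cheap divisibility test first, then the sqrt-bounded primality test
def geLoopB_up (t : Int) (i : Int) : Nat → Option Int
  | 0 => none
  | k + 1 =>
    if i < t + 1 then
      if !(PySem.Int.mod t i == 0) && isprimeAlt i then some i else geLoopB_up t (i + 1) k
    else none

-- next((i for i in range(t, 0, -1) if sieve[i] and t % i), None): find? over the materialized range
-- (every scanned index i lies in [1, t] ⊆ [0, len), so 'sieve[i]' is exactly Array.getD i.toNat)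
def generate_e_alt (p : Int) (q : Int) (bigger : Bool) : Option Int :=
  let t := (p - 1) * (q - 1)
  if bigger then
    let sieve := buildSieve t
    (PySem.List.pyRange t 0 (-1)).find?
      (fun i => sieve.getD i.toNat false && !(PySem.Int.mod t i == 0))
  else
    match geLoopB_up t 2 (t + 1 - 2).toNat with
    | some i => some i
    | none => some (-1)

-- ===== PRECONDITION & SPEC =====
def Spec_generate_e (p : Int) (q : Int) (bigger : Bool) (out : Option Int) : Prop := out = generate_e_alt p q bigger
instance (p : Int) (q : Int) (bigger : Bool) (out : Option Int) : Decidable (Spec_generate_e p q bigger out) := by unfold Spec_generate_e; infer_instance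

-- ===== CLAIM (what is proved, stated in full; the proofs are below) =====
def Claim_equal_generate_e : Prop := ∀ (p : Int) (q : Int) (bigger : Bool), Dom_generate_e p q bigger → Spec_generate_e p q bigger (generate_e p q bigger)

-- ===== LEMMAS AND PROOFS =====

-- A's inner loop with adequate fuel returns true iff no candidate in [i, num) divides num
lemma isprimeLoop_true_iff (num : Int) :
    ∀ (k : Nat) (i : Int), (num - i).toNat ≤ k →
      (isprimeLoop num i k = true ↔ ∀ m : Int, i ≤ m → m < num → ¬ PySem.Int.mod num m = 0) := by
  intro k
  induction k with
  | zero =>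
    intro i hk
    simp only [isprimeLoop]
    constructor
    · intro _ m him hm; omega
    · intro _; trivial
  | succ k ih =>
    intro i hk
    by_cases hlt : i < num
    · rw [isprimeLoop, if_pos hlt]
      by_cases hmod : PySem.Int.mod num i == 0
      · rw [if_pos hmod]
        simp only [Bool.false_eq_true, false_iff]
        intro h
        exact h i (le_refl i) hlt (by simpa using hmod)
      · rw [if_neg hmod, ih (i + 1) (by omega)]
        constructor
        · intro h m him hm
          rcases eq_or_lt_of_le him with rfl | h1
          · simpa using hmod
          · exact h m (by omega) hm
        · intro h m him hm
          exact h m (by omega) hm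
    · rw [isprimeLoop, if_neg hlt]
      constructor
      · intro _ m him hm; omega
      · intro _; rfl

-- A's primality test, characterized: no divisor in [2, num)
lemma isprime_true_iff (n : Int) :
    isprime n = true ↔ ∀ m : Int, 2 ≤ m → m < n → ¬ m ∣ n := by
  unfold isprime
  rw [isprimeLoop_true_iff n ((n - 2).toNat) 2 (by omega)]
  constructor
  · intro h m h2 hm hdvd
    exact h m h2 hm ((PySem.Int.mod_eq_zero_iff_dvd n m).mpr hdvd)
  · intro h m h2 hm hmod
    exact h m h2 hm ((PySem.Int.mod_eq_zero_iff_dvd n m).mp hmod)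

-- marking a list of cells preserves the size
lemma foldl_set_size (L : List Int) : ∀ (s : Array Bool),
    (L.foldl (fun s j => s.setIfInBounds j.toNat false) s).size = s.size := by
  induction L with
  | nil => intro s; rfl
  | cons j L ih => intro s; rw [List.foldl_cons, ih, Array.size_setIfInBounds]

-- cell n after marking the (nonnegative) cells listed in L
lemma foldl_set_getD (L : List Int) : ∀ (s : Array Bool) (n : Nat), (∀ j ∈ L, 0 ≤ j) → n < s.size →
    (L.foldl (fun s j => s.setIfInBounds j.toNat false) s).getD n false
      = if (n : Int) ∈ L then false else s.getD n false := by
  induction L with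
  | nil => intro s n _ _; simp
  | cons j L ih =>
    intro s n hL hn
    rw [List.foldl_cons, ih (s.setIfInBounds j.toNat false) n
        (fun x hx => hL x (List.mem_cons_of_mem _ hx))
        (by rw [Array.size_setIfInBounds]; exact hn)]
    have hj0 : 0 ≤ j := hL j (List.mem_cons_self ..)
    by_cases hmem : (n : Int) ∈ L
    · rw [if_pos hmem, if_pos (List.mem_cons_of_mem _ hmem)]
    · rw [if_neg hmem]
      by_cases hje : (n : Int) = j
      · have hjn : j.toNat = n := by omega
        rw [if_pos (by simp [hje]), Array.getD_eq_getD_getElem?, Array.getElem?_setIfInBounds,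
            if_pos hjn, if_pos (hjn ▸ hn), Option.getD_some]
      · rw [if_neg (by simp [hje, hmem]), Array.getD_eq_getD_getElem?,
            Array.getElem?_setIfInBounds, if_neg (by omega), ← Array.getD_eq_getD_getElem?]

-- the sieve loop turns "no divisor d < i with d*d ≤ n" cells into "no divisor d with d*d ≤ n" cells
lemma markMultiples_size (t : Int) (s : Array Bool) (i : Int) :
    (markMultiples t s i).size = s.size := by
  unfold markMultiples; exact foldl_set_size _ s

lemma sieveLoop_getD (t : Int) : ∀ (k : Nat) (i : Int) (s : Array Bool),
    2 ≤ i → s.size = (t + 1).toNat → (t + 1 - i).toNat ≤ k →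
    (∀ n : Nat, n < s.size →
      (s.getD n false = false ↔ ∃ d : Int, 2 ≤ d ∧ d < i ∧ d ∣ (n : Int) ∧ d * d ≤ (n : Int))) →
    ∀ n : Nat, n < s.size →
      ((sieveLoop t s i k).getD n false = false ↔
        ∃ d : Int, 2 ≤ d ∧ d ∣ (n : Int) ∧ d * d ≤ (n : Int)) := by
  intro k
  induction k with
  | zero =>
    intro i s hi hsz hk hinv n hn
    have hti : t < i := by omega
    rw [sieveLoop, hinv n hn]
    constructor
    · rintro ⟨d, hd2, _, hdn, hdd⟩; exact ⟨d, hd2, hdn, hdd⟩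
    · rintro ⟨d, hd2, hdn, hdd⟩
      have hnt : (n : Int) ≤ t := by omega
      have hdi : d < i := by nlinarith
      exact ⟨d, hd2, hdi, hdn, hdd⟩
  | succ k ih =>
    intro i s hi hsz hk hinv n hn
    by_cases hg : i * i ≤ t
    · have hit : i ≤ t := by nlinarith
      have hisz : i.toNat < s.size := by omega
      have hicast : ((i.toNat : Int)) = i := by omega
      rw [sieveLoop, if_pos hg]
      by_cases hcell : s.getD i.toNat false = true
      · rw [if_pos hcell]
        have hsz' : (markMultiples t s i).size = (t + 1).toNat := by
          rw [markMultiples_size]; exact hsz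
        have hinv' : ∀ m : Nat, m < (markMultiples t s i).size →
            ((markMultiples t s i).getD m false = false ↔
              ∃ d : Int, 2 ≤ d ∧ d < i + 1 ∧ d ∣ (m : Int) ∧ d * d ≤ (m : Int)) := by
          intro m hm
          rw [markMultiples_size] at hm
          have hmt : (m : Int) ≤ t := by omega
          have hnn : ∀ j ∈ PySem.List.pyRange (i * i) (t + 1) i, (0 : Int) ≤ j := by
            intro j hj
            have := (PySem.List.mem_pyRange_iff_of_pos (by omega : (0:Int) < i) j).mp hj
            nlinarith [this.1]
          unfold markMultiples
          rw [foldl_set_getD _ s m hnn hm]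
          by_cases hmem : ((m : Int)) ∈ PySem.List.pyRange (i * i) (t + 1) i
          · have h1 := (PySem.List.mem_pyRange_iff_of_pos (by omega : (0:Int) < i) _).mp hmem
            rw [if_pos hmem]
            simp only [true_iff]
            refine ⟨i, by omega, by omega, ?_, h1.1⟩
            rcases h1.2.2 with ⟨c, hc⟩
            exact ⟨c + i, by linarith [hc]⟩
          · rw [if_neg hmem, hinv m hm]
            constructor
            · rintro ⟨d, hd2, hdi, hdn, hdd⟩; exact ⟨d, hd2, by omega, hdn, hdd⟩
            · rintro ⟨d, hd2, hdi, hdn, hdd⟩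
              refine ⟨d, hd2, ?_, hdn, hdd⟩
              rcases lt_or_eq_of_le (by omega : d ≤ i) with h | rfl
              · exact h
              · exfalso
                apply hmem
                refine (PySem.List.mem_pyRange_iff_of_pos (by omega) _).mpr ⟨hdd, by omega, ?_⟩
                rcases hdn with ⟨c, hc⟩
                exact ⟨c - d, by linarith [hc]⟩
        exact ih (i + 1) (markMultiples t s i) (by omega) hsz' (by omega) hinv' n (by omega)
      · rw [if_neg hcell]
        rw [Bool.not_eq_true] at hcell
        have hid := (hinv i.toNat hisz).mp hcell
        rw [hicast] at hid
        rcases hid with ⟨d0, hd02, hd0i, hd0dvd, hd0sq⟩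
        have hinv' : ∀ m : Nat, m < s.size →
            (s.getD m false = false ↔
              ∃ d : Int, 2 ≤ d ∧ d < i + 1 ∧ d ∣ (m : Int) ∧ d * d ≤ (m : Int)) := by
          intro m hm
          rw [hinv m hm]
          constructor
          · rintro ⟨d, hd2, hdi, hdn, hdd⟩; exact ⟨d, hd2, by omega, hdn, hdd⟩
          · rintro ⟨d, hd2, hdi, hdn, hdd⟩
            rcases lt_or_eq_of_le (by omega : d ≤ i) with h | rfl
            · exact ⟨d, hd2, h, hdn, hdd⟩
            · have hin : d ≤ (m : Int) := by nlinarith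
              exact ⟨d0, hd02, hd0i, hd0dvd.trans hdn, by nlinarith⟩
        exact ih (i + 1) s (by omega) hsz (by omega) hinv' n hn
    · rw [sieveLoop, if_neg hg, hinv n hn]
      rw [not_le] at hg
      constructor
      · rintro ⟨d, hd2, _, hdn, hdd⟩; exact ⟨d, hd2, hdn, hdd⟩
      · rintro ⟨d, hd2, hdn, hdd⟩
        have hnt : (n : Int) ≤ t := by omega
        have hdi : d < i := by nlinarith
        exact ⟨d, hd2, hdi, hdn, hdd⟩

-- the sieve cell of 1 ≤ i ≤ t IS A's isprime(i)
lemma sieve_getD (t i : Int) (h1 : 1 ≤ i) (h2 : i ≤ t) :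
    (buildSieve t).getD i.toNat false = isprime i := by
  unfold buildSieve
  have hcast : ((i.toNat : Int)) = i := by omega
  have hsz : (Array.replicate (t + 1).toNat true).size = (t + 1).toNat := Array.size_replicate
  have hinv : ∀ n : Nat, n < (Array.replicate (t + 1).toNat true).size →
      ((Array.replicate (t + 1).toNat true).getD n false = false ↔
        ∃ d : Int, 2 ≤ d ∧ d < 2 ∧ d ∣ (n : Int) ∧ d * d ≤ (n : Int)) := by
    intro n hn
    rw [Array.getD_eq_getD_getElem?, Array.getElem?_replicate, if_pos (by omega), Option.getD_some]
    constructor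
    · intro h; exact absurd h (by simp)
    · rintro ⟨d, hd2, hd2', _⟩; omega
  have H := sieveLoop_getD t t.toNat 2 (Array.replicate (t + 1).toNat true)
      le_rfl hsz (by omega) hinv i.toNat (by omega)
  rw [hcast] at H
  by_cases hb : (sieveLoop t (Array.replicate (t + 1).toNat true) 2 t.toNat).getD i.toNat false
        = true
  · rw [hb]
    symm
    rw [isprime_true_iff]
    intro m hm2 hmi hdvd
    rcases hdvd with ⟨c, hc⟩
    have hc2 : 2 ≤ c := by nlinarith
    have hec : min m c ∣ i := by
      rcases le_total m c with h | h
      · rw [min_eq_left h]; exact ⟨c, hc⟩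
      · rw [min_eq_right h]; exact ⟨m, by linarith [hc, mul_comm m c]⟩
    have : (sieveLoop t (Array.replicate (t + 1).toNat true) 2 t.toNat).getD i.toNat false
        = false := by
      refine H.mpr ⟨min m c, le_min hm2 hc2, hec, ?_⟩
      have h2' : min m c * min m c ≤ m * c :=
        mul_le_mul (min_le_left _ _) (min_le_right _ _) (by omega) (by omega)
      nlinarith
    rw [this] at hb
    exact absurd hb (by simp)
  · rw [Bool.not_eq_true] at hb
    rw [hb]
    rcases H.mp hb with ⟨d, hd2, hdn, hdd⟩
    symm
    rw [Bool.eq_false_iff, Ne, isprime_true_iff]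
    intro hall
    have h2d : 2 * d ≤ d * d := by nlinarith
    exact hall d hd2 (by omega) hdn

-- the scan conditions agree on every candidate 1 ≤ x ≤ t
lemma cond_eq (t x : Int) (h1 : 1 ≤ x) (h2 : x ≤ t) :
    (isprime x && !(PySem.Int.mod t x == 0))
      = ((buildSieve t).getD x.toNat false && !(PySem.Int.mod t x == 0)) := by
  rw [sieve_getD t x h1 h2]

-- A's descending fuel loop is B's find? over range(t, 0, -1)
lemma down_eq (t : Int) : ∀ (k : Nat) (i : Int), i ≤ t → i.toNat ≤ k →
    geLoopA_down t i k = (PySem.List.pyRange i 0 (-1)).find?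
      (fun x => (buildSieve t).getD x.toNat false && !(PySem.Int.mod t x == 0)) := by
  intro k
  induction k with
  | zero =>
    intro i _ hk
    rw [PySem.List.pyRange_neg_one_eq_nil (by omega), geLoopA_down, List.find?_nil]
  | succ k ih =>
    intro i hit hk
    by_cases hpos : 0 < i
    · rw [geLoopA_down, if_pos hpos, PySem.List.pyRange_neg_one_cons hpos, List.find?_cons,
          cond_eq t i (by omega) hit]
      by_cases hc : ((buildSieve t).getD i.toNat false && !(PySem.Int.mod t i == 0)) = true
      · rw [if_pos hc, hc]
      · rw [Bool.not_eq_true] at hc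
        rw [if_neg (by rw [hc]; exact Bool.false_ne_true), hc]
        exact ih (i - 1) (by omega) (by omega)
    · rw [geLoopA_down, if_neg hpos, PySem.List.pyRange_neg_one_eq_nil (by omega), List.find?_nil]

-- B's odd-divisor loop with adequate fuel, characterized for start values d ≥ 3
lemma isprimeAltLoop_true_iff (n : Int) :
    ∀ (k : Nat) (d : Int), 3 ≤ d → (n - d).toNat ≤ 2 * k →
      (isprimeAltLoop n d k = true ↔
        ∀ e : Int, d ≤ e → 2 ∣ (e - d) → e * e ≤ n → ¬ PySem.Int.mod n e = 0) := by
  intro k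
  induction k with
  | zero =>
    intro d hd hk
    simp only [isprimeAltLoop]
    constructor
    · intro _ e hde _ hee
      exfalso
      have he3 : 3 ≤ e := by omega
      have h1 : 3 * e ≤ e * e := by nlinarith
      have h2 : n ≤ d := by omega
      linarith
    · intro _; trivial
  | succ k ih =>
    intro d hd hk
    by_cases hlt : d < n
    · rw [isprimeAltLoop, if_pos hlt]
      by_cases hbig : d * d > n
      · rw [if_pos hbig]
        constructor
        · intro _ e hde _ hee
          exfalso
          have h1 : d * d ≤ e * e := mul_le_mul hde hde (by omega) (by omega)
          linarith
        · intro _; rfl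
      · rw [if_neg hbig]
        by_cases hmod : PySem.Int.mod n d == 0
        · rw [if_pos hmod]
          simp only [Bool.false_eq_true, false_iff]
          intro h
          exact h d (le_refl d) (by simp) (by linarith) (by simpa using hmod)
        · rw [if_neg hmod, ih (d + 2) (by omega) (by omega)]
          constructor
          · intro h e hde he2 hee
            rcases eq_or_lt_of_le hde with rfl | h1
            · simpa using hmod
            · exact h e (by omega) (by omega) hee
          · intro h e hde he2 hee
            exact h e (by omega) (by omega) hee
    · rw [isprimeAltLoop, if_neg hlt]
      constructor
      · intro _ e hde _ hee
        exfalso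
        have he3 : 3 ≤ e := by omega
        have h1 : 3 * e ≤ e * e := by nlinarith
        have h2 : n ≤ d := by omega
        linarith
      · intro _; rfl

-- B's primality test, characterized, for n ≥ 2: same "no divisor in [2, n)" condition
lemma isprimeAlt_true_iff (n : Int) (hn : 2 ≤ n) :
    isprimeAlt n = true ↔ ∀ m : Int, 2 ≤ m → m < n → ¬ m ∣ n := by
  unfold isprimeAlt
  by_cases heven : PySem.Int.mod n 2 == 0
  · have h2n : (2 : Int) ∣ n := (PySem.Int.mod_eq_zero_iff_dvd n 2).mp (by simpa using heven)
    simp only [heven, if_true]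
    constructor
    · intro h m h2 hm
      have : n = 2 := by simpa using h
      omega
    · intro h
      by_cases h2 : n = 2
      · simp [h2]
      · exact absurd h2n (h 2 (by omega) (by omega))
  · have hodd : ¬ (2 : Int) ∣ n := fun h =>
      heven (by simpa using (PySem.Int.mod_eq_zero_iff_dvd n 2).mpr h)
    simp only [heven, Bool.false_eq_true, if_false]
    rw [isprimeAltLoop_true_iff n ((n - 3).toNat) 3 (by norm_num) (by omega)]
    constructor
    · intro h m h2 hmn hdvd
      -- n is odd, so m and n/m are odd; the smaller of the two is an odd divisor e with e*e ≤ n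
      have hmodd : ¬ (2 : Int) ∣ m := fun hm => hodd (hm.trans hdvd)
      rcases hdvd with ⟨k, hk⟩
      have hkdvd : k ∣ n := ⟨m, by rw [hk, mul_comm]⟩
      have hkodd : ¬ (2 : Int) ∣ k := fun h2k => hodd (h2k.trans hkdvd)
      have hkpos : 0 < k := by nlinarith
      have hk1 : k ≠ 1 := fun h1 => by rw [h1, mul_one] at hk; omega
      have hk2 : 2 ≤ k := by omega
      have hm3 : 3 ≤ m := by omega
      have hk3 : 3 ≤ k := by omega
      set e := min m k with he
      have hem : e ≤ m := min_le_left _ _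
      have hek : e ≤ k := min_le_right _ _
      have he3 : 3 ≤ e := le_min hm3 hk3
      have heodd : ¬ (2 : Int) ∣ e := by
        rcases min_cases m k with ⟨h1, _⟩ | ⟨h1, _⟩ <;> rw [he, h1] <;> assumption
      have hedvd : e ∣ n := by
        rcases min_cases m k with ⟨h1, _⟩ | ⟨h1, _⟩ <;> rw [he, h1]
        · exact ⟨k, hk⟩
        · exact hkdvd
      have hee : e * e ≤ n := by nlinarith
      exact h e he3 (by omega) hee ((PySem.Int.mod_eq_zero_iff_dvd n e).mpr hedvd)
    · intro h e he3 _ hee hmod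
      have hen : e < n := by nlinarith
      exact h e (by omega) hen ((PySem.Int.mod_eq_zero_iff_dvd n e).mp hmod)

-- the two primality tests agree on every i ≥ 2
lemma isprime_eq_isprimeAlt (i : Int) (hi : 2 ≤ i) : isprime i = isprimeAlt i := by
  rw [Bool.eq_iff_iff, isprime_true_iff, isprimeAlt_true_iff i hi]

-- A's ascending fuel loop agrees with B's, fuel in lockstep, from any start i ≥ 2
lemma geLoop_up_eq (t : Int) :
    ∀ (k : Nat) (i : Int), 2 ≤ i → geLoopA_up t i k = geLoopB_up t i k := by
  intro k
  induction k with
  | zero => intro i _; rfl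
  | succ k ih =>
    intro i hi
    by_cases hlt : i < t + 1
    · rw [geLoopA_up, geLoopB_up, if_pos hlt, if_pos hlt,
          isprime_eq_isprimeAlt i hi, Bool.and_comm]
      by_cases hc : (!(PySem.Int.mod t i == 0) && isprimeAlt i) = true
      · rw [if_pos hc, if_pos hc]
      · rw [if_neg hc, if_neg hc, ih (i + 1) (by omega)]
    · rw [geLoopA_up, geLoopB_up, if_neg hlt, if_neg hlt]

-- A's ascending scan from 1 equals B's from 2: i = 1 never fires (t % 1 == 0)
lemma up_from_one_eq (t : Int) :
    geLoopA_up t 1 (t + 1 - 1).toNat = geLoopB_up t 2 (t + 1 - 2).toNat := by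
  have hmod1 : PySem.Int.mod t 1 = 0 :=
    (PySem.Int.mod_eq_zero_iff_dvd t 1).mpr (one_dvd t)
  by_cases hpos : 1 ≤ t
  · have hfuel : (t + 1 - 1).toNat = (t + 1 - 2).toNat + 1 := by omega
    rw [hfuel, geLoopA_up, if_pos (by omega : (1 : Int) < t + 1),
        if_neg (by rw [hmod1]; simp)]
    exact geLoop_up_eq t ((t + 1 - 2).toNat) 2 (le_refl 2)
  · rw [show (t + 1 - 1).toNat = 0 by omega, show (t + 1 - 2).toNat = 0 by omega]
    rfl

-- ===== VERDICT (by name: the statement is the Claim_ definition above) =====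
theorem generate_e_spec : Claim_equal_generate_e := by
  intro p q bigger _
  unfold Spec_generate_e generate_e generate_e_alt
  dsimp only
  cases bigger with
  | true =>
    simp only [if_true]
    exact down_eq ((p - 1) * (q - 1)) ((p - 1) * (q - 1)).toNat ((p - 1) * (q - 1)) le_rfl le_rfl
  | false =>
    simp only [Bool.false_eq_true, if_false]
    rw [up_from_one_eq ((p - 1) * (q - 1))]
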